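-- pv_equiv track=rewrite | github.com/wallacebaleroni/NonogramSolver | main.py | is_solution_line
-- ===== SOURCE A (Python) =====
-- def is_solution_line(line, original_values):
--     sequence_size = 0
--     values = []
--
--     for i in range(len(line)):
--         if line[i] == 'O':
--             sequence_size += 1
--         else:
--             if sequence_size > 0:
--                 values.append(sequence_size)
--                 sequence_size = 0
--     if sequence_size > 0:
--         values.append(sequence_size)
--
--     if len(values) != len(original_values):
--         return False
--
--     for i in range(len(values)):
--         if values[i] != original_values[i]:
--             return False
--
--     return True
-- ===== SOURCE B (Python) =====
-- def is_solution_line(line, original_values):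
--     i, n = 0, len(line)
--     for v in original_values:
--         while i < n and line[i] != 'O':
--             i += 1
--         if i == n:
--             return False  # no run left for this expected value
--         run = 0
--         while i < n and line[i] == 'O':
--             run += 1
--             i += 1
--         if run != v:
--             return False
--     while i < n:
--         if line[i] == 'O':
--             return False  # extra run beyond the expected values
--         i += 1
--     return True
-- ===== Notes on version B (the rewrite author's own statement) =====
-- stated objective: alternative
-- what changed: Instead of building the full run-length list and then comparing it to original_values, B iterates over original_values and consumes the line with a single cursor, matching each expected run in place and exiting early on the first mismatch or leftover run; no intermediate list is built.
import Mathlib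
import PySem

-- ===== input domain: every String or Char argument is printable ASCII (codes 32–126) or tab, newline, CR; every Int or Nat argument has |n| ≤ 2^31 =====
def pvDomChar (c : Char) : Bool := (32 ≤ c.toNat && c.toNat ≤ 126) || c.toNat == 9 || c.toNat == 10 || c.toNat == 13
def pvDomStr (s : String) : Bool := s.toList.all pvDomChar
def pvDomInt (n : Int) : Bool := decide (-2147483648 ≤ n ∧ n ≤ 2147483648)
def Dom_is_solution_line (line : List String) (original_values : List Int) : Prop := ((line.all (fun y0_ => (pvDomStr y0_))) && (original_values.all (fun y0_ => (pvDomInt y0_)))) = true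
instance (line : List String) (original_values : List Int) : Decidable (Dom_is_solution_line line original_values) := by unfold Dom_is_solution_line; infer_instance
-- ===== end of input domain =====

-- B replaces A's build-the-run-list-then-compare approach by a single-cursor matcher
-- that walks original_values and consumes the line run by run, exiting early (alternative).

-- ===== PORT A =====
-- A's first loop: state (sequence_size, values)
def pvStepA (p : Int × List Int) (s : String) : Int × List Int :=
  if s == "O" then (p.1 + 1, p.2)
  else if p.1 > 0 then (0, p.2 ++ [p.1]) else p

-- A's values after the loop and the trailing flush
def pvValuesA (line : List String) : List Int :=
  if (line.foldl pvStepA (0, [])).1 > 0 then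
    (line.foldl pvStepA (0, [])).2 ++ [(line.foldl pvStepA (0, [])).1]
  else (line.foldl pvStepA (0, [])).2

def is_solution_line (line : List String) (original_values : List Int) : Bool :=
  if (pvValuesA line).length ≠ original_values.length then false
  else
    -- second loop: early return False on first mismatching index
    (List.range (pvValuesA line).length).all
      (fun i => (pvValuesA line).getD i 0 == original_values.getD i 0)

-- ===== PORT B =====
-- B's cursor i over line is ported as the remaining suffix of line.
-- inner while: skip cells until the cursor sees 'O' (or the line ends)
def pvSkipGap (l : List String) : List String :=
  match l with
  | [] => []
  | x :: xs => if x == "O" then x :: xs else pvSkipGap xs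

-- inner while: count the 'O'-run under the cursor, returning (run, rest of line)
def pvTakeRun (l : List String) : Int × List String :=
  match l with
  | [] => (0, [])
  | x :: xs =>
      if x == "O" then
        let p := pvTakeRun xs
        (p.1 + 1, p.2)
      else (0, x :: xs)

-- trailing while: any 'O' left means an extra run
def pvNoRunLeft (l : List String) : Bool := l.all (fun s => !(s == "O"))

-- outer for-loop over original_values
def pvMatchB (l : List String) (vals : List Int) : Bool :=
  match vals with
  | [] => pvNoRunLeft l
  | v :: vs =>
      match pvSkipGap l with
      | [] => false
      | x :: xs =>
          let p := pvTakeRun (x :: xs)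
          if p.1 != v then false else pvMatchB p.2 vs

def is_solution_line_alt (line : List String) (original_values : List Int) : Bool :=
  pvMatchB line original_values

-- ===== PRECONDITION & SPEC =====
def Spec_is_solution_line (line : List String) (original_values : List Int) (out : Bool) : Prop := out = is_solution_line_alt line original_values
instance (line : List String) (original_values : List Int) (out : Bool) : Decidable (Spec_is_solution_line line original_values out) := by unfold Spec_is_solution_line; infer_instance

-- ===== CLAIM (what is proved, stated in full; the proofs are below) =====
def Claim_equal_is_solution_line : Prop := ∀ (line : List String) (original_values : List Int), Dom_is_solution_line line original_values → Spec_is_solution_line line original_values (is_solution_line line original_values)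

-- ===== LEMMAS AND PROOFS =====

-- reference run-length function (A's loop, recursively)
def pvRuns (n : Int) : List String → List Int
  | [] => if n > 0 then [n] else []
  | x :: xs => if x == "O" then pvRuns (n + 1) xs
               else if n > 0 then n :: pvRuns 0 xs else pvRuns 0 xs

lemma pvFoldA (l : List String) : ∀ (n : Int) (acc : List Int), 0 ≤ n →
    (if (l.foldl pvStepA (n, acc)).1 > 0 then
        (l.foldl pvStepA (n, acc)).2 ++ [(l.foldl pvStepA (n, acc)).1]
      else (l.foldl pvStepA (n, acc)).2) = acc ++ pvRuns n l := by
  induction l with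
  | nil => intro n acc _; simp [pvRuns]; split <;> simp
  | cons x xs ih =>
      intro n acc hn0
      simp only [List.foldl_cons, pvStepA, pvRuns]
      by_cases hx : x == "O"
      · have h := ih (n + 1) acc (by omega)
        simpa [hx] using h
      · simp only [hx, Bool.false_eq_true, if_false]
        by_cases hn : n > 0
        · simp [hn, ih _ _ le_rfl, List.append_assoc]
        · have : n = 0 := by omega
          subst this
          simp [ih _ _ le_rfl]

lemma pvValuesA_eq_runs (line : List String) : pvValuesA line = pvRuns 0 line := by
  have := pvFoldA line 0 [] le_rfl
  simpa [pvValuesA] using this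

lemma pvTakeRun_nonneg (l : List String) : 0 ≤ (pvTakeRun l).1 := by
  induction l with
  | nil => simp [pvTakeRun]
  | cons x xs ih =>
      by_cases hx : x == "O" <;> simp [pvTakeRun, hx] <;> omega

lemma pvRuns_takeRun (l : List String) : ∀ (n : Int), 0 ≤ n →
    pvRuns n l = (if n + (pvTakeRun l).1 > 0 then
        (n + (pvTakeRun l).1) :: pvRuns 0 (pvTakeRun l).2
      else pvRuns 0 (pvTakeRun l).2) := by
  induction l with
  | nil => intro n _; simp [pvRuns, pvTakeRun]
  | cons x xs ih =>
      intro n hn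
      by_cases hx : x == "O"
      · have h := ih (n + 1) (by omega)
        simp only [pvRuns, hx, if_true, pvTakeRun]
        rw [h]
        have : n + 1 + (pvTakeRun xs).1 = n + ((pvTakeRun xs).1 + 1) := by ring
        simp [this]
      · have hxs : pvRuns 0 (x :: xs) = pvRuns 0 xs := by simp [pvRuns, hx]
        simp only [pvRuns, hx, Bool.false_eq_true, if_false, pvTakeRun]
        by_cases hpos : n > 0
        · simp [hpos, hxs]
        · have : n = 0 := by omega
          subst this
          simp [hxs]

lemma pvRuns_skipGap (l : List String) : pvRuns 0 l = pvRuns 0 (pvSkipGap l) := by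
  induction l with
  | nil => simp [pvSkipGap]
  | cons x xs ih =>
      by_cases hx : x == "O"
      · simp [pvSkipGap, hx]
      · simp [pvSkipGap, hx, pvRuns, ← ih]

lemma pvSkipGap_head (l : List String) :
    pvSkipGap l = [] ∨ ∃ xs, pvSkipGap l = "O" :: xs := by
  induction l with
  | nil => left; rfl
  | cons x xs ih =>
      by_cases hx : x == "O"
      · right
        have : x = "O" := by simpa using hx
        exact ⟨xs, by simp [pvSkipGap, hx, this]⟩
      · simpa [pvSkipGap, hx] using ih

lemma pvNoRunLeft_iff (l : List String) : pvNoRunLeft l = (pvRuns 0 l == []) := by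
  induction l with
  | nil => simp [pvNoRunLeft, pvRuns]
  | cons x xs ih =>
      by_cases hx : x == "O"
      · have hne : pvRuns 0 (x :: xs) ≠ [] := by
          simp only [pvRuns, hx, if_true]
          rw [show (0:Int)+1 = 1 from rfl, pvRuns_takeRun xs 1 (by norm_num)]
          have := pvTakeRun_nonneg xs
          have hpos : 1 + (pvTakeRun xs).1 > 0 := by omega
          simp [hpos]
        simp [pvNoRunLeft, hx, beq_eq_false_iff_ne, hne]
      · simp only [pvNoRunLeft, List.all_cons, hx, Bool.not_false, Bool.true_and]
        rw [show pvRuns 0 (x :: xs) = pvRuns 0 xs from by simp [pvRuns, hx]]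
        exact ih

lemma pvMatchB_eq_runs (vals : List Int) : ∀ (l : List String),
    pvMatchB l vals = (pvRuns 0 l == vals) := by
  induction vals with
  | nil => intro l; simpa [pvMatchB] using pvNoRunLeft_iff l
  | cons v vs ih =>
      intro l
      rw [pvRuns_skipGap l]
      rcases pvSkipGap_head l with h | ⟨xs, h⟩
      · simp [pvMatchB, h, pvRuns]
      · have hrunpos : 0 < (pvTakeRun ("O" :: xs)).1 := by
          have := pvTakeRun_nonneg xs
          simp only [pvTakeRun, if_true, show (("O" : String) == "O") = true from rfl]
          omega
        have hruns : pvRuns 0 ("O" :: xs) =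
            (pvTakeRun ("O" :: xs)).1 :: pvRuns 0 (pvTakeRun ("O" :: xs)).2 := by
          rw [pvRuns_takeRun ("O" :: xs) 0 le_rfl]
          simp [hrunpos]
        simp only [pvMatchB, h, hruns, List.cons_beq_cons]
        by_cases hv : (pvTakeRun ("O" :: xs)).1 = v
        · simp [hv, ih]
        · simp [hv, bne_iff_ne, Ne, hv]

lemma pvCheck_eq (va vb : List Int) (h : va.length = vb.length) :
    ((List.range va.length).all (fun i => va.getD i 0 == vb.getD i 0)) = (va == vb) := by
  by_cases hv : va = vb
  · subst hv; simp
  · have hbe : (va == vb) = false := by simpa using hv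
    rw [hbe]
    by_contra hall
    apply hv
    apply List.ext_getElem h
    intro i h1 h2
    simp only [Bool.not_eq_false, List.all_eq_true, List.mem_range] at hall
    have := hall i h1
    simpa [List.getD_eq_getElem?_getD, List.getElem?_eq_getElem, h1, h2] using this

-- ===== VERDICT (by name: the statement is the Claim_ definition above) =====
theorem is_solution_line_spec : Claim_equal_is_solution_line := by
  intro line original_values _
  unfold Spec_is_solution_line is_solution_line is_solution_line_alt
  rw [pvMatchB_eq_runs, ← pvValuesA_eq_runs]
  by_cases hlen : (pvValuesA line).length = original_values.length
  · simp only [hlen, ne_eq, not_true_eq_false, if_false]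
    rw [← hlen]
    exact pvCheck_eq _ _ hlen
  · have hbe : (pvValuesA line == original_values) = false := by
      simpa using fun h => hlen (by rw [h])
    simp [hlen, hbe]
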